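-- pv_equiv track=rewrite | github.com/alexedmon1/neurofaune | neurofaune/reporting/index_generator.py | _group_entries
-- ===== SOURCE A (Python) =====
-- from typing import Any, Dict, Optional
--
-- _TYPE_ORDER = ["tbss", "roi_extraction", "covnet", "connectome", "classification", "regression", "mvpa", "batch_qc"]
--
-- def _group_entries(entries: list) -> list:
--     """Group entries by analysis_type in display order."""
--     by_type: Dict[str, list] = {}
--     for e in entries:
--         atype = e.get("analysis_type", "other")
--         by_type.setdefault(atype, []).append(e)
--
--     groups = []
--     for atype in _TYPE_ORDER:
--         if atype in by_type:
--             groups.append((atype, by_type.pop(atype)))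
--     # Remaining types
--     for atype in sorted(by_type.keys()):
--         groups.append((atype, by_type[atype]))
--
--     return groups
-- ===== SOURCE B (Python) =====
-- _TYPE_ORDER = ["tbss", "roi_extraction", "covnet", "connectome", "classification", "regression", "mvpa", "batch_qc"]
--
-- def _group_entries(entries: list) -> list:
--     """Group entries by analysis_type in display order."""
--     by_type = {}
--     for e in entries:
--         by_type.setdefault(e.get("analysis_type", "other"), []).append(e)
--     prio = {t: i for i, t in enumerate(_TYPE_ORDER)}
--     n = len(_TYPE_ORDER)
--     return sorted(by_type.items(), key=lambda kv: (prio.get(kv[0], n), kv[0]))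
-- ===== Notes on version B (the rewrite author's own statement) =====
-- stated objective: simpler
-- what changed: The two-phase ordering (loop over _TYPE_ORDER popping matching groups, then a separate sort of the leftover keys) is replaced by one rank-keyed sort of all groups: a prio index map over _TYPE_ORDER and a single sorted(by_type.items(), key=(prio.get(k, n), k)).
import Mathlib
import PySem

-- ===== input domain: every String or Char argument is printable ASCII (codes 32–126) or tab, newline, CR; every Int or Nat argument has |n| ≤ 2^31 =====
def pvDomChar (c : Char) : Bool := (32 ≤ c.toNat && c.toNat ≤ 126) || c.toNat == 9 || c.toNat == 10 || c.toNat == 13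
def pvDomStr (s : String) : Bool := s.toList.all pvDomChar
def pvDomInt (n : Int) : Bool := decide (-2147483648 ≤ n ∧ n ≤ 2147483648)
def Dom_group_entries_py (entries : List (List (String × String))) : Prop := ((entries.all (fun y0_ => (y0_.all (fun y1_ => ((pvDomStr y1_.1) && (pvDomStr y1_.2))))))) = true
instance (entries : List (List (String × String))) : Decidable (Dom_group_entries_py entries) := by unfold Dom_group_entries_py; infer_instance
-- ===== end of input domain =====

-- B replaces A's two-phase ordering (scan _TYPE_ORDER popping matches, then sort the leftover
-- keys) by a single sort of all groups keyed by (rank in _TYPE_ORDER, name); same return value.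

-- _TYPE_ORDER
def pvTypeOrder : List String :=
  ["tbss", "roi_extraction", "covnet", "connectome", "classification", "regression", "mvpa", "batch_qc"]

-- the shared grouping loop: by_type = {}; for e in entries: by_type.setdefault(e.get("analysis_type","other"), []).append(e)
def pvByType (entries : List (List (String × String))) :
    PySem.Dict String (List (List (String × String))) :=
  entries.foldl
    (fun d e => d.modify ((PySem.Dict.ofList e).getD "analysis_type" "other") [] (fun l => l ++ [e]))
    PySem.Dict.empty

-- ===== PORT A =====
def group_entries_py (entries : List (List (String × String))) : List (String × (List (List (String × String)))) :=
  let byType := pvByType entries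
  -- for atype in _TYPE_ORDER: if atype in by_type: groups.append((atype, by_type.pop(atype)))
  let st := pvTypeOrder.foldl
    (fun (st : List (String × List (List (String × String))) × PySem.Dict String (List (List (String × String)))) t =>
      if st.2.contains t then (st.1 ++ [(t, st.2.getD t [])], st.2.erase t) else st)
    ([], byType)
  -- for atype in sorted(by_type.keys()): groups.append((atype, by_type[atype]))
  -- (by_type[atype] ported as getD with default []: exact, the key is present)
  st.1 ++ (PySem.List.sorted st.2.keys (fun k => k)).map (fun k => (k, st.2.getD k []))

-- ===== PORT B =====
-- prio = {t: i for i, t in enumerate(_TYPE_ORDER)}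
def pvPrio : PySem.Dict String Int :=
  (PySem.List.enumerate pvTypeOrder 0).foldl (fun p it => p.insert it.2 it.1) PySem.Dict.empty

-- prio.get(k, n) with n = len(_TYPE_ORDER)
def pvRank (k : String) : Int := pvPrio.getD k (pvTypeOrder.length : Int)

-- Python's tuple key (prio.get(k, n), k) compares lexicographically: ported as toLex
def group_entries_py_alt (entries : List (List (String × String))) : List (String × (List (List (String × String)))) :=
  PySem.List.sorted (pvByType entries).items (fun kv => toLex (pvRank kv.1, kv.1))

-- ===== PRECONDITION & SPEC =====
def Spec_group_entries_py (entries : List (List (String × String))) (out : List (String × (List (List (String × String))))) : Prop := out = group_entries_py_alt entries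
instance (entries : List (List (String × String))) (out : List (String × (List (List (String × String))))) : Decidable (Spec_group_entries_py entries out) := by unfold Spec_group_entries_py; infer_instance

-- ===== CLAIM (what is proved, stated in full; the proofs are below) =====
def Claim_equal_group_entries_py : Prop := ∀ (entries : List (List (String × String))), Dom_group_entries_py entries → Spec_group_entries_py entries (group_entries_py entries)

-- ===== LEMMAS AND PROOFS =====

theorem pv_nodup_typeOrder : pvTypeOrder.Nodup := by decide

theorem pv_rank_pairwise : pvTypeOrder.Pairwise (fun a b => pvRank a < pvRank b) := by decide

theorem pv_rank_lt_of_mem : ∀ t ∈ pvTypeOrder, pvRank t < 8 := by decide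

theorem pv_prio_eq : pvPrio = PySem.Dict.mk
    [("tbss", 0), ("roi_extraction", 1), ("covnet", 2), ("connectome", 3),
     ("classification", 4), ("regression", 5), ("mvpa", 6), ("batch_qc", 7)] := by decide

theorem pv_rank_of_not_mem (k : String) (h : k ∉ pvTypeOrder) : pvRank k = 8 := by
  simp [pvTypeOrder] at h
  obtain ⟨h1, h2, h3, h4, h5, h6, h7, h8⟩ := h
  have e1 : ("tbss" == k) = false := by simp [Ne.symm h1]
  have e2 : ("roi_extraction" == k) = false := by simp [Ne.symm h2]
  have e3 : ("covnet" == k) = false := by simp [Ne.symm h3]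
  have e4 : ("connectome" == k) = false := by simp [Ne.symm h4]
  have e5 : ("classification" == k) = false := by simp [Ne.symm h5]
  have e6 : ("regression" == k) = false := by simp [Ne.symm h6]
  have e7 : ("mvpa" == k) = false := by simp [Ne.symm h7]
  have e8 : ("batch_qc" == k) = false := by simp [Ne.symm h8]
  simp [pvRank, pv_prio_eq, PySem.Dict.getD, PySem.Dict.get?, List.find?, pvTypeOrder,
        e1, e2, e3, e4, e5, e6, e7, e8]

theorem pv_nodup_keys_insert {ν : Type} (d : PySem.Dict String ν) (k : String) (v : ν)
    (h : d.keys.Nodup) : (d.insert k v).keys.Nodup := by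
  unfold PySem.Dict.insert
  by_cases hc : d.contains k = true
  · simp only [hc, if_pos]
    have : (PySem.Dict.mk (d.items.map (fun p => if (p.1 == k) = true then (k, v) else p))).keys
        = d.keys := by
      simp only [PySem.Dict.keys, List.map_map]
      apply List.map_congr_left
      intro p _
      by_cases hp : p.1 = k <;> simp [hp]
    rw [this]; exact h
  · simp only [hc, if_neg, Bool.false_eq_true, not_false_iff]
    have hk : k ∉ d.keys := by
      intro hkk
      simp only [PySem.Dict.keys, List.mem_map] at hkk
      obtain ⟨p, hp, he⟩ := hkk
      have h2 : d.contains k = true := by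
        simp only [PySem.Dict.contains, List.any_eq_true]
        exact ⟨p, hp, by simp [he]⟩
      simp [h2] at hc
    simp only [PySem.Dict.keys, List.map_append, List.map_cons, List.map_nil]
    rw [List.nodup_append]
    exact ⟨h, List.nodup_singleton _, fun a ha b hb => by simp at hb; subst hb; exact fun he => hk (he ▸ ha)⟩

theorem pv_nodup_keys_byType (entries : List (List (String × String))) :
    (pvByType entries).keys.Nodup := by
  unfold pvByType
  have : ∀ (l : List (List (String × String))) (d : PySem.Dict String (List (List (String × String)))),
      d.keys.Nodup →
      (l.foldl (fun d e =>
        d.modify ((PySem.Dict.ofList e).getD "analysis_type" "other") [] (fun l => l ++ [e])) d).keys.Nodup := by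
    intro l
    induction l with
    | nil => intro d h; exact h
    | cons e t ih =>
      intro d h
      exact ih _ (by unfold PySem.Dict.modify; exact pv_nodup_keys_insert _ _ _ h)
  exact this entries PySem.Dict.empty (by simp [PySem.Dict.empty, PySem.Dict.keys])

theorem pv_find?_filter_ne {ν : Type} (l : List (String × ν)) (k k' : String) (h : k' ≠ k) :
    List.find? (fun p => p.1 == k') (l.filter (fun p => !(p.1 == k)))
      = List.find? (fun p => p.1 == k') l := by
  induction l with
  | nil => rfl
  | cons p t ih =>
    rw [List.filter_cons]
    by_cases hp : p.1 = k
    · rw [if_neg (by simp [hp])]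
      rw [List.find?_cons_of_neg (by simp [hp, Ne.symm h])]
      exact ih
    · rw [if_pos (by simp [hp])]
      by_cases hp' : p.1 = k'
      · rw [List.find?_cons_of_pos (by simp [hp']), List.find?_cons_of_pos (by simp [hp'])]
      · rw [List.find?_cons_of_neg (by simp [hp']), List.find?_cons_of_neg (by simp [hp'])]
        exact ih

theorem pv_get?_erase_ne {ν : Type} (d : PySem.Dict String ν) (k k' : String) (h : k' ≠ k) :
    (d.erase k).get? k' = d.get? k' := by
  obtain ⟨l⟩ := d
  simp only [PySem.Dict.erase, PySem.Dict.get?]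
  rw [pv_find?_filter_ne l k k' h]

theorem pv_get?_erase_self {ν : Type} (d : PySem.Dict String ν) (k : String) :
    (d.erase k).get? k = none := by
  obtain ⟨l⟩ := d
  simp only [PySem.Dict.erase, PySem.Dict.get?]
  rw [List.find?_eq_none.mpr, Option.map_none]
  intro p hp
  rw [List.mem_filter] at hp
  simpa using hp.2

theorem pv_keys_erase_sublist {ν : Type} (d : PySem.Dict String ν) (k : String) :
    (d.erase k).keys.Sublist d.keys := by
  simp only [PySem.Dict.erase, PySem.Dict.keys]
  exact List.Sublist.map _ List.filter_sublist

theorem pv_erase_of_not_contains {ν : Type} (d : PySem.Dict String ν) (t : String)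
    (h : d.contains t = false) : d.erase t = d := by
  obtain ⟨l⟩ := d
  simp only [PySem.Dict.contains] at h
  rw [List.any_eq_false] at h
  simp only [PySem.Dict.erase]
  congr 1
  rw [List.filter_eq_self]
  intro p hp
  simpa using h p hp

theorem pv_eraseList_get? (ts : List String) (d : PySem.Dict String (List (List (String × String)))) (k : String) :
    (ts.foldl (fun d t => d.erase t) d).get? k = if k ∈ ts then none else d.get? k := by
  induction ts generalizing d with
  | nil => simp
  | cons t ts ih =>
    simp only [List.foldl_cons, ih]
    by_cases hk : k = t
    · subst hk
      by_cases hmem : k ∈ ts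
      · simp [hmem]
      · simp [hmem, pv_get?_erase_self]
    · by_cases hmem : k ∈ ts <;> simp [hmem, hk, pv_get?_erase_ne _ _ _ hk]

theorem pv_eraseList_keys_nodup (ts : List String) (d : PySem.Dict String (List (List (String × String))))
    (h : d.keys.Nodup) : (ts.foldl (fun d t => d.erase t) d).keys.Nodup := by
  induction ts generalizing d with
  | nil => exact h
  | cons t ts ih => exact ih _ ((pv_keys_erase_sublist d t).nodup h)

theorem pv_loop_spec (ts : List String) (hts : ts.Nodup)
    (gs : List (String × (List (List (String × String))))) (d : PySem.Dict String (List (List (String × String)))) :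
    ts.foldl (fun st t => if st.2.contains t then (st.1 ++ [(t, st.2.getD t [])], st.2.erase t) else st) (gs, d)
      = (gs ++ ts.filterMap (fun t => (d.get? t).map (fun v => (t, v))),
         ts.foldl (fun d t => d.erase t) d) := by
  induction ts generalizing gs d with
  | nil => simp
  | cons t ts ih =>
    obtain ⟨hnt, hts'⟩ := List.nodup_cons.mp hts
    simp only [List.foldl_cons]
    by_cases hc : d.contains t = true
    · rw [if_pos hc]
      obtain ⟨v, hv⟩ : ∃ v, d.get? t = some v := by
        rw [PySem.Dict.contains_eq_isSome_get?] at hc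
        exact Option.isSome_iff_exists.mp hc
      rw [ih hts' _ _]
      rw [List.filterMap_congr (g := fun t' => (d.get? t').map (fun v => (t', v)))
            (fun x hx => by rw [pv_get?_erase_ne d t x (fun he => hnt (he ▸ hx))])]
      rw [List.filterMap_cons]
      simp [hv, PySem.Dict.getD_of_get?_eq_some _ _ hv]
    · rw [if_neg hc]
      have hcf : d.contains t = false := by simpa using hc
      have hnone : d.get? t = none := by
        rw [PySem.Dict.contains_eq_isSome_get?] at hcf
        simpa using hcf
      rw [ih hts' _ _, List.filterMap_cons]
      simp [hnone, pv_erase_of_not_contains d t hcf]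

theorem pv_map_fst_filterMap (ts : List String) (d : PySem.Dict String (List (List (String × String)))) :
    (ts.filterMap (fun t => (d.get? t).map (fun v => (t, v)))).map Prod.fst
      = ts.filter (fun t => (d.get? t).isSome) := by
  induction ts with
  | nil => rfl
  | cons t ts ih =>
    rw [List.filterMap_cons, List.filter_cons]
    cases hv : d.get? t <;> simp [ih]

theorem pv_mem_of_filterMap {p : String × (List (List (String × String)))} (ts : List String) (d : PySem.Dict String (List (List (String × String))))
    (hp : p ∈ ts.filterMap (fun t => (d.get? t).map (fun v => (t, v)))) :
    p.1 ∈ ts ∧ d.get? p.1 = some p.2 := by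
  rw [List.mem_filterMap] at hp
  obtain ⟨t, ht, hft⟩ := hp
  cases hv : d.get? t with
  | none => rw [hv] at hft; simp at hft
  | some v =>
    rw [hv] at hft
    simp only [Option.map_some, Option.some.injEq] at hft
    subst hft
    exact ⟨ht, hv⟩

theorem pv_mem_keys_iff_isSome (d : PySem.Dict String (List (List (String × String)))) (k : String) :
    k ∈ d.keys ↔ (d.get? k).isSome = true := by
  have h := PySem.Dict.get?_eq_none_iff_not_mem_keys d k
  rw [Option.isSome_iff_ne_none]
  tauto

-- ===== VERDICT (by name: the statement is the Claim_ definition above) =====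
theorem group_entries_py_spec : Claim_equal_group_entries_py := by
  intro entries _
  show group_entries_py entries = group_entries_py_alt entries
  simp only [group_entries_py, group_entries_py_alt]
  rw [pv_loop_spec pvTypeOrder pv_nodup_typeOrder [] (pvByType entries)]
  set d := pvByType entries with hdd
  set d1 := pvTypeOrder.foldl (fun d t => d.erase t) d with hd1
  simp only [List.nil_append]
  set K : String × (List (List (String × String))) → Lex (Int × String) := fun kv => toLex (pvRank kv.1, kv.1) with hK
  set ph1 := pvTypeOrder.filterMap (fun t => (d.get? t).map (fun v => (t, v))) with hph1
  set ph2 := (PySem.List.sorted d1.keys (fun k => k)).map (fun k => (k, d1.getD k [])) with hph2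
  have hnd : d.keys.Nodup := pv_nodup_keys_byType entries
  have hd1get : ∀ k, d1.get? k = if k ∈ pvTypeOrder then none else d.get? k :=
    fun k => pv_eraseList_get? pvTypeOrder d k
  have hd1nodup : d1.keys.Nodup := pv_eraseList_keys_nodup pvTypeOrder d hnd
  have hmem_d1 : ∀ k, k ∈ d1.keys ↔ (k ∉ pvTypeOrder ∧ k ∈ d.keys) := by
    intro k
    have h1 := PySem.Dict.get?_eq_none_iff_not_mem_keys d1 k
    have h2 := PySem.Dict.get?_eq_none_iff_not_mem_keys d k
    rw [hd1get k] at h1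
    by_cases hm : k ∈ pvTypeOrder
    · simp only [hm, if_pos] at h1
      simp only [hm, not_true_eq_false, false_and, iff_false]
      tauto
    · simp only [hm, if_neg, not_false_iff] at h1
      simp only [hm, not_false_iff, true_and]
      tauto
  have hkeys_eq : d.items.map Prod.fst = d.keys := rfl
  have hsub : ∀ p ∈ ph1 ++ ph2, p ∈ d.items := by
    intro p hp
    rcases List.mem_append.mp hp with hp | hp
    · obtain ⟨ht, hv⟩ := pv_mem_of_filterMap pvTypeOrder d (hph1 ▸ hp)
      exact PySem.Dict.mem_items_of_get?_eq_some _ hv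
    · rw [hph2, List.mem_map] at hp
      obtain ⟨k, hk, rfl⟩ := hp
      rw [PySem.List.mem_sorted] at hk
      have hkk := (hmem_d1 k).mp hk
      obtain ⟨v, hv⟩ : ∃ v, d1.get? k = some v := by
        rcases h : d1.get? k with _ | v
        · exact absurd ((PySem.Dict.get?_eq_none_iff_not_mem_keys d1 k).mp h) (by simpa using hk)
        · exact ⟨v, rfl⟩
      have hgd : d.get? k = some v := by
        have h := hd1get k
        rw [hv, if_neg hkk.1] at h
        exact h.symm
      rw [PySem.Dict.getD_of_get?_eq_some _ _ hv]
      exact PySem.Dict.mem_items_of_get?_eq_some _ hgd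
  have hfst : ((ph1 ++ ph2).map Prod.fst).Perm d.keys := by
    rw [List.map_append, hph1, pv_map_fst_filterMap, hph2, List.map_map]
    have h2 : (Prod.fst ∘ fun k => (k, d1.getD k [])) = id := rfl
    rw [h2, List.map_id]
    have hsplit := List.filter_append_perm (fun k => decide (k ∈ pvTypeOrder)) d.keys
    refine List.Perm.trans (List.Perm.append ?_ ?_) hsplit
    · rw [List.perm_ext_iff_of_nodup (pv_nodup_typeOrder.filter _) (hnd.filter _)]
      intro t
      simp only [List.mem_filter, decide_eq_true_eq]
      rw [pv_mem_keys_iff_isSome]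
      tauto
    · refine (PySem.List.sorted_perm d1.keys (fun k => k) false).trans ?_
      rw [List.perm_ext_iff_of_nodup hd1nodup (hnd.filter _)]
      intro k
      simp only [List.mem_filter, Bool.not_eq_true', decide_eq_false_iff_not]
      rw [hmem_d1 k]
      tauto
  have hfst2 : ((ph1 ++ ph2).map Prod.fst).Perm (d.items.map Prod.fst) := by
    rw [hkeys_eq]; exact hfst
  have hknodup : (d.items.map Prod.fst).Nodup := hkeys_eq ▸ hnd
  have hperm : (ph1 ++ ph2).Perm d.items := by
    have hysnodup : (ph1 ++ ph2).Nodup := List.Nodup.of_map _ (hfst2.nodup_iff.mpr hknodup)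
    have hitnodup : d.items.Nodup := List.Nodup.of_map _ hknodup
    rw [List.perm_ext_iff_of_nodup hysnodup hitnodup]
    intro p
    constructor
    · exact hsub p
    · intro hp
      have hmm : p.1 ∈ (ph1 ++ ph2).map Prod.fst :=
        hfst2.mem_iff.mpr (List.mem_map_of_mem hp)
      rw [List.mem_map] at hmm
      obtain ⟨q, hq, hq1⟩ := hmm
      have hqi := hsub q hq
      have := List.inj_on_of_nodup_map hknodup hqi hp hq1
      exact this ▸ hq
  have hpw : List.Pairwise (fun a b => K a < K b) (ph1 ++ ph2) := by
    rw [List.pairwise_append]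
    refine ⟨?_, ?_, ?_⟩
    · rw [hph1, List.pairwise_filterMap]
      refine pv_rank_pairwise.imp ?_
      intro a b hr p hp q hq
      cases hva : d.get? a <;> rw [hva] at hp <;> simp only [Option.map_some, Option.map_none] at hp
      · exact absurd hp (by simp)
      cases hvb : d.get? b <;> rw [hvb] at hq <;> simp only [Option.map_some, Option.map_none] at hq
      · exact absurd hq (by simp)
      rw [Option.some.injEq] at hp hq
      subst hp; subst hq
      simp only [hK]
      rw [Prod.Lex.toLex_lt_toLex]
      left
      exact hr
    · rw [hph2, List.pairwise_map]
      have hsp := PySem.List.sorted_pairwise d1.keys (fun k => k)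
      have hnds : (PySem.List.sorted d1.keys (fun k => k) false).Nodup :=
        ((PySem.List.sorted_perm d1.keys (fun k => k) false).nodup_iff).mpr hd1nodup
      have hlt := hsp.and hnds
      refine hlt.imp_of_mem ?_
      intro a b ha hb hab
      have ha' : a ∉ pvTypeOrder := ((hmem_d1 a).mp ((PySem.List.mem_sorted _ _ _ _).mp ha)).1
      have hb' : b ∉ pvTypeOrder := ((hmem_d1 b).mp ((PySem.List.mem_sorted _ _ _ _).mp hb)).1
      simp only [hK]
      rw [Prod.Lex.toLex_lt_toLex]
      right
      exact ⟨by rw [pv_rank_of_not_mem a ha', pv_rank_of_not_mem b hb'],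
             lt_of_le_of_ne hab.1 hab.2⟩
    · intro a ha b hb
      have ha1 := (pv_mem_of_filterMap pvTypeOrder d (hph1 ▸ ha)).1
      have hb1 : b.1 ∉ pvTypeOrder := by
        rw [hph2, List.mem_map] at hb
        obtain ⟨k, hk, rfl⟩ := hb
        exact ((hmem_d1 k).mp ((PySem.List.mem_sorted _ _ _ _).mp hk)).1
      simp only [hK]
      rw [Prod.Lex.toLex_lt_toLex]
      left
      rw [pv_rank_of_not_mem _ hb1]
      exact pv_rank_lt_of_mem _ ha1
  exact (PySem.List.sorted_eq_of_perm_of_pairwise_lt d.items (ph1 ++ ph2) K hperm hpw).symm
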